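-- pv_equiv track=rewrite | github.com/paulklemstine/factor | lean/demo/Pythagorean/quantum_gate_open_questions_demo.py | find_lattice_points
-- ===== SOURCE A (Python) =====
-- import math
-- from typing import List, Tuple, Dict, Optional
--
-- def find_lattice_points(d: int) -> List[Tuple[int,int,int,int]]:
--     """Find all integer quaternions at norm d."""
--     points = []
--     s = int(math.isqrt(d)) + 1
--     for w in range(-s, s+1):
--         for x in range(-s, s+1):
--             for y in range(-s, s+1):
--                 for z in range(-s, s+1):
--                     if w*w + x*x + y*y + z*z == d:
--                         points.append((w, x, y, z))
--     return points
-- ===== SOURCE B (Python) =====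
-- import math
-- from typing import List, Tuple
--
-- def find_lattice_points(d: int) -> List[Tuple[int,int,int,int]]:
--     """Find all integer quaternions at norm d."""
--     s = int(math.isqrt(d)) + 1
--     rng = range(-s, s + 1)
--     two = {}
--     for y in rng:
--         for z in rng:
--             two.setdefault(y*y + z*z, []).append((y, z))
--     points = []
--     for w in rng:
--         for x in rng:
--             for (y, z) in two.get(d - w*w - x*x, []):
--                 points.append((w, x, y, z))
--     return points
-- ===== Notes on version B (the rewrite author's own statement) =====
-- stated objective: faster
-- what changed: Replaces the quadruple loop over (w,x,y,z) by a meet-in-the-middle dictionary: all two-square sums y*y+z*z are grouped once into a dict, then each (w,x) pair looks up the matching (y,z) list.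
import Mathlib
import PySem

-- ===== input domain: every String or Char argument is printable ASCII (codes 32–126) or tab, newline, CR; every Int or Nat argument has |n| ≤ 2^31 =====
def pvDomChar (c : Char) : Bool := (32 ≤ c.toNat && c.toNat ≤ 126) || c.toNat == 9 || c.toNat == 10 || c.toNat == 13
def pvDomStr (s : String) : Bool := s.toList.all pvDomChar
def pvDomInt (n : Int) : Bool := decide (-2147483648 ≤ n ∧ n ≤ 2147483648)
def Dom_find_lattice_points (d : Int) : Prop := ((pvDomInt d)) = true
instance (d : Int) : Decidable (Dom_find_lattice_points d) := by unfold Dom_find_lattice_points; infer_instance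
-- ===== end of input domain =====

-- B replaces A's quadruple scan by a dictionary of two-square sums built once and looked up per (w,x): asymptotically faster, same output order.

-- ===== PORT A =====
-- int(math.isqrt(d)) + 1 ; exact for d ≥ 0 (Pre_); math.isqrt raises ValueError on d < 0
def pvIsqrtS (d : Int) : Int := (Nat.sqrt d.toNat : Int) + 1

def find_lattice_points (d : Int) : List (Int × Int × Int × Int) :=
  let s := pvIsqrtS d
  let rng := PySem.List.pyRange (-s) (s+1) 1
  rng.foldl (fun points w =>
    rng.foldl (fun points x =>
      rng.foldl (fun points y =>
        rng.foldl (fun points z =>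
          if w*w + x*x + y*y + z*z == d then points ++ [(w, x, y, z)] else points)
          points) points) points) []

-- ===== PORT B =====
def find_lattice_points_alt (d : Int) : List (Int × Int × Int × Int) :=
  let s := pvIsqrtS d
  let rng := PySem.List.pyRange (-s) (s+1) 1
  -- two.setdefault(y*y+z*z, []).append((y,z))  ==  modify key, default [], append
  let two : PySem.Dict Int (List (Int × Int)) :=
    rng.foldl (fun dct y =>
      rng.foldl (fun dct z => dct.modify (y*y + z*z) [] (· ++ [(y, z)])) dct)
      PySem.Dict.empty
  rng.foldl (fun points w =>
    rng.foldl (fun points x =>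
      (two.getD (d - w*w - x*x) []).foldl (fun points p => points ++ [(w, x, p.1, p.2)])
        points) points) []

-- ===== PRECONDITION & SPEC =====
-- Pre_: math.isqrt(d) raises ValueError for d < 0 in both A and B, so only d ≥ 0 is admitted.
def Pre_find_lattice_points (d : Int) : Prop := 0 ≤ d
instance (d : Int) : Decidable (Pre_find_lattice_points d) := by unfold Pre_find_lattice_points; infer_instance
def pvWitness_find_lattice_points : Int := (4)

def Spec_find_lattice_points (d : Int) (out : List (Int × Int × Int × Int)) : Prop := out = find_lattice_points_alt d
instance (d : Int) (out : List (Int × Int × Int × Int)) : Decidable (Spec_find_lattice_points d out) := by unfold Spec_find_lattice_points; infer_instance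

-- ===== CLAIM (what is proved, stated in full; the proofs are below) =====
def Claim_equal_find_lattice_points : Prop := ∀ (d : Int), Dom_find_lattice_points d → Pre_find_lattice_points d → Spec_find_lattice_points d (find_lattice_points d)

-- ===== LEMMAS AND PROOFS =====

-- the stream of (y,z) pairs both programs traverse, in order
def pvPairs (l : List Int) : List (Int × Int) := l.flatMap (fun y => l.map (fun z => (y, z)))

-- B's dict lookup is the in-order filter of the pair stream by its two-square sum
lemma pvDict_getD (l : List Int) (c : Int) :
    ((l.foldl (fun dct y =>
        l.foldl (fun dct z => dct.modify (y*y + z*z) [] (· ++ [(y, z)])) dct)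
        (PySem.Dict.empty : PySem.Dict Int (List (Int × Int)))).getD c [])
    = (pvPairs l).filter (fun p => p.1*p.1 + p.2*p.2 == c) := by
  have h1 : (l.foldl (fun dct y =>
        l.foldl (fun dct z => dct.modify (y*y + z*z) [] (· ++ [(y, z)])) dct)
        (PySem.Dict.empty : PySem.Dict Int (List (Int × Int))))
      = ((pvPairs l).map (fun p => (p.1*p.1 + p.2*p.2, p))).foldl
          (fun dct q => dct.modify q.1 [] (· ++ [q.2])) PySem.Dict.empty := by
    simp [pvPairs, List.foldl_flatMap, List.foldl_map]
  rw [h1, PySem.Dict.getD_foldl_modify_append]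
  rw [List.filter_map, List.map_map]
  simp [Function.comp_def]
lemma pvInner (l : List Int) (d w x : Int) (acc : List (Int × Int × Int × Int)) :
    l.foldl (fun points y =>
      l.foldl (fun points z =>
        if w*w + x*x + y*y + z*z == d then points ++ [(w, x, y, z)] else points)
        points) acc
    = acc ++ ((pvPairs l).filter (fun p => p.1*p.1 + p.2*p.2 == d - w*w - x*x)).map
        (fun p => (w, x, p.1, p.2)) := by
  have h : ∀ y, ∀ points : List (Int × Int × Int × Int),
      l.foldl (fun points z =>
        if w*w + x*x + y*y + z*z == d then points ++ [(w, x, y, z)] else points) points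
      = points ++ (l.filter (fun z => w*w + x*x + y*y + z*z == d)).map (fun z => (w, x, y, z)) := by
    intro y points
    exact PySem.List.foldl_append_if _ _ _ _
  calc l.foldl (fun points y =>
      l.foldl (fun points z =>
        if w*w + x*x + y*y + z*z == d then points ++ [(w, x, y, z)] else points)
        points) acc
      = l.foldl (fun points y =>
          points ++ (l.filter (fun z => w*w + x*x + y*y + z*z == d)).map (fun z => (w, x, y, z))) acc := by
        exact PySem.List.foldl_congr_mem _ _ _ _ (fun points y _ => h y points)
    _ = acc ++ l.flatMap (fun y =>
          (l.filter (fun z => w*w + x*x + y*y + z*z == d)).map (fun z => (w, x, y, z))) := by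
        exact PySem.List.foldl_append_eq_flatMap _ _ _
    _ = acc ++ ((pvPairs l).filter (fun p => p.1*p.1 + p.2*p.2 == d - w*w - x*x)).map
          (fun p => (w, x, p.1, p.2)) := by
        congr 1
        simp only [pvPairs, List.filter_flatMap, List.map_flatMap]
        apply List.flatMap_congr
        intro y _
        rw [List.filter_map, List.map_map]
        congr 1
        apply List.filter_congr
        intro z _
        simp only [Function.comp_apply]
        by_cases hc : w * w + x * x + y * y + z * z = d
        · simp [hc, show y * y + z * z = d - w * w - x * x by omega]
        · simp [hc, show y * y + z * z ≠ d - w * w - x * x by omega]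

theorem find_lattice_points_eq_alt (d : Int) : find_lattice_points d = find_lattice_points_alt d := by
  unfold find_lattice_points find_lattice_points_alt
  set s := pvIsqrtS d
  set l := PySem.List.pyRange (-s) (s+1) 1 with hl
  simp only []
  apply PySem.List.foldl_congr_mem
  intro acc w _
  apply PySem.List.foldl_congr_mem
  intro acc2 x _
  rw [pvInner, pvDict_getD, PySem.List.foldl_append_singleton_eq_map]

-- ===== VERDICT (by name: the statement is the Claim_ definition above) =====
theorem find_lattice_points_spec : Claim_equal_find_lattice_points := by
  intro d _ _
  unfold Spec_find_lattice_points
  exact find_lattice_points_eq_alt d
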